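-- pv_equiv track=rewrite | github.com/dneff/adventofcode | python/2017/09/solution1.py | remove_garbage
-- ===== SOURCE A (Python) =====
-- def remove_garbage(stream):
--     """
--     Remove all garbage from the stream, including escape sequences.
--
--     Garbage is anything between < and >, where ! escapes the next character.
--
--     Args:
--         stream: String containing groups and garbage
--
--     Returns:
--         Clean string with only group delimiters and commas
--     """
--     clean = []
--     offset = 0
--     in_garbage = False
--
--     while offset < len(stream):
--         if stream[offset] == '<':
--             in_garbage = True
--         elif stream[offset] == '!':
--             offset += 1  # Skip the next character
--         elif stream[offset] == '>':
--             in_garbage = False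
--         elif not in_garbage:
--             clean.append(stream[offset])
--         offset += 1
--
--     return ''.join(clean)
-- ===== SOURCE B (Python) =====
-- def remove_garbage(stream):
--     """Two-pass version: first strip '!'-escapes everywhere, then drop garbage."""
--     # Pass 1: remove every '!' together with the character after it.
--     unescaped = []
--     i = 0
--     n = len(stream)
--     while i < n:
--         if stream[i] == '!':
--             i += 2
--         else:
--             unescaped.append(stream[i])
--             i += 1
--     # Pass 2: drop everything between '<' and '>' (delimiters included).
--     clean = []
--     in_garbage = False
--     for c in unescaped:
--         if c == '<':
--             in_garbage = True
--         elif c == '>':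
--             in_garbage = False
--         elif not in_garbage:
--             clean.append(c)
--     return ''.join(clean)
-- ===== Notes on version B (the rewrite author's own statement) =====
-- stated objective: alternative
-- what changed: Single stateful while-loop with index skipping is replaced by two sequential passes: one that deletes each escape character together with the character it escapes, then a garbage filter over the resulting escape-free string.
import Mathlib
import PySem

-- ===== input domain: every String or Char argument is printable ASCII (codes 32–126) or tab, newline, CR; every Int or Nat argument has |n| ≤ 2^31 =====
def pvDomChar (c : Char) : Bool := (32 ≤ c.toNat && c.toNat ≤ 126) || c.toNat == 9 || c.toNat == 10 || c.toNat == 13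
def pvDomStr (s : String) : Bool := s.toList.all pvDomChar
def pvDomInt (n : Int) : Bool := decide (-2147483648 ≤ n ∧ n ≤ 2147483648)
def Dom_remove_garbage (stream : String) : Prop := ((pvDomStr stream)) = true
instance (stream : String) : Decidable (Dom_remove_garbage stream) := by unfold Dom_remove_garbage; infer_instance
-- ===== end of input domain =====

-- B replaces A's single stateful scan by two sequential passes (strip escape pairs, then filter garbage); objective: alternative decomposition, same cost.

-- ===== PORT A =====
-- A's while loop over stream[offset] with in_garbage state; the escape branch does offset += 1 twice, i.e. drops the next char.
def removeGarbageLoopA : List Char → Bool → List Char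
  | [], _ => []
  | c :: rest, g =>
    if c = '<' then removeGarbageLoopA rest true
    else if c = '!' then
      match rest with
      | [] => []
      | _ :: r => removeGarbageLoopA r g
    else if c = '>' then removeGarbageLoopA rest false
    else if !g then c :: removeGarbageLoopA rest g
    else removeGarbageLoopA rest g

def remove_garbage (stream : String) : String :=
  String.ofList (removeGarbageLoopA stream.toList false)

-- ===== PORT B =====
-- Pass 1: delete each escape character together with the following character.
def stripEscapes : List Char → List Char
  | [] => []
  | c :: rest =>
    if c = '!' then
      match rest with
      | [] => []
      | _ :: r => stripEscapes r
    else c :: stripEscapes rest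

-- Pass 2: drop everything between '<' and '>' (delimiters included).
def dropGarbage : List Char → Bool → List Char
  | [], _ => []
  | c :: rest, g =>
    if c = '<' then dropGarbage rest true
    else if c = '>' then dropGarbage rest false
    else if !g then c :: dropGarbage rest g
    else dropGarbage rest g

def remove_garbage_alt (stream : String) : String :=
  String.ofList (dropGarbage (stripEscapes stream.toList) false)

-- ===== PRECONDITION & SPEC =====
def Spec_remove_garbage (stream : String) (out : String) : Prop := out = remove_garbage_alt stream
instance (stream : String) (out : String) : Decidable (Spec_remove_garbage stream out) := by unfold Spec_remove_garbage; infer_instance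

-- ===== CLAIM (what is proved, stated in full; the proofs are below) =====
def Claim_equal_remove_garbage : Prop := ∀ (stream : String), Dom_remove_garbage stream → Spec_remove_garbage stream (remove_garbage stream)

-- ===== LEMMAS AND PROOFS =====
theorem loopA_eq_two_pass (cs : List Char) (g : Bool) :
    removeGarbageLoopA cs g = dropGarbage (stripEscapes cs) g := by
  induction cs, g using removeGarbageLoopA.induct with
  | case1 g => rfl
  | case2 rest g ih =>
      rw [removeGarbageLoopA.eq_def, stripEscapes.eq_def]
      simp [dropGarbage, ih]
  | case3 g h => rfl
  | case4 g head r h ih =>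
      rw [removeGarbageLoopA.eq_def, stripEscapes.eq_def]
      simp [ih]
  | case5 rest g h1 h2 ih =>
      rw [removeGarbageLoopA.eq_def, stripEscapes.eq_def]
      simp [dropGarbage, ih]
  | case6 c rest g h1 h2 h3 hg ih =>
      rw [removeGarbageLoopA.eq_def, stripEscapes.eq_def]
      simp [dropGarbage, h1, h2, h3, hg, ih]
  | case7 c rest g h1 h2 h3 hg ih =>
      rw [removeGarbageLoopA.eq_def, stripEscapes.eq_def]
      simp [dropGarbage, h1, h2, h3, hg, ih]

-- ===== VERDICT (by name: the statement is the Claim_ definition above) =====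
theorem remove_garbage_spec : Claim_equal_remove_garbage := by
  intro stream _
  unfold Spec_remove_garbage remove_garbage remove_garbage_alt
  rw [loopA_eq_two_pass]
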